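-- pv_equiv track=rewrite | github.com/lottery-ticket/code | plot/unified_plot.py | argcummax
-- ===== SOURCE A (Python) =====
-- def argcummax(x):
--     if len(x) == 0:
--         return []
--     maxidx = 0
--     maxval = x[0]
--     res = [maxidx]
--     for i in range(1, len(x)):
--         if x[i] > maxval:
--             maxidx = i
--             maxval = x[i]
--         res.append(maxidx)
--     return res
-- ===== SOURCE B (Python) =====
-- def argcummax(x):
--     return [x[:i + 1].index(max(x[:i + 1])) for i in range(len(x))]
-- ===== Notes on version B (the rewrite author's own statement) =====
-- stated objective: simpler
-- what changed: Replaces the stateful running-max loop (maintained maxidx/maxval accumulators) with a one-line comprehension that rescans each prefix, taking the first index of the prefix maximum.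
import Mathlib
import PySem

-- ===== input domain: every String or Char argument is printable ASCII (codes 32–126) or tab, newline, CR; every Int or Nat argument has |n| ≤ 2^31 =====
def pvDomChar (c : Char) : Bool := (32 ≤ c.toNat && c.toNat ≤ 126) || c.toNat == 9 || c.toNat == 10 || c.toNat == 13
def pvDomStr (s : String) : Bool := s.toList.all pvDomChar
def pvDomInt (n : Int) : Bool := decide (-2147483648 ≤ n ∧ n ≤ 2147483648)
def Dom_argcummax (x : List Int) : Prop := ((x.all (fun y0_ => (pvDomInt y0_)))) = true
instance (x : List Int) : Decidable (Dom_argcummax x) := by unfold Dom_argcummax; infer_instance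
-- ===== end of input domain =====

-- B replaces A's single stateful running-max pass by a comprehension that rescans
-- each prefix (first index of the prefix maximum); objective: simpler (one line).

-- ===== PORT A =====
-- literal transliteration of A: guard for empty, then a fold over range(1, len(x))
-- carrying (maxidx, maxval, res); res.append(maxidx) inlined in each branch of the if.
def argcummax (x : List Int) : List Int :=
  if x.length = 0 then []
  else
    let s := (PySem.List.pyRange 1 (x.length : Int) 1).foldl
      (fun (st : Int × Int × List Int) (i : Int) =>
        match st with
        | (maxidx, maxval, res) =>
          let xi := PySem.List.pyGetD x i 0
          if xi > maxval then (i, xi, res ++ [i])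
          else (maxidx, maxval, res ++ [maxidx]))
      (0, PySem.List.pyGetD x 0 0, [(0 : Int)])
    s.2.2

-- ===== PORT B =====
-- literal transliteration of B: [x[:i+1].index(max(x[:i+1])) for i in range(len(x))]
def argcummax_alt (x : List Int) : List Int :=
  (PySem.List.pyRange 0 (x.length : Int) 1).map (fun (i : Int) =>
    let p := PySem.List.slice x none (some (i + 1))
    match PySem.List.max? p (fun y => y) with
    | some m => ((PySem.List.index? p m).getD 0 : Nat)
    | none => 0)

-- ===== PRECONDITION & SPEC =====
def Spec_argcummax (x : List Int) (out : List Int) : Prop := out = argcummax_alt x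
instance (x : List Int) (out : List Int) : Decidable (Spec_argcummax x out) := by unfold Spec_argcummax; infer_instance

-- ===== CLAIM (what is proved, stated in full; the proofs are below) =====
def Claim_equal_argcummax : Prop := ∀ (x : List Int), Dom_argcummax x → Spec_argcummax x (argcummax x)

-- ===== LEMMAS AND PROOFS =====

-- running maximum of x0 :: t.take k  (A's maxval after k loop steps)
def pvMval (x0 : Int) (t : List Int) (k : Nat) : Int := (t.take k).foldl max x0

-- earliest index of that maximum in the prefix (A's maxidx after k loop steps)
def pvMidx (x0 : Int) (t : List Int) (k : Nat) : Nat :=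
  (PySem.List.index? (x0 :: t.take k) (pvMval x0 t k)).getD 0

-- B's entry for the prefix x0 :: t.take k is pvMidx
lemma pvEntry_eq (x0 : Int) (t : List Int) (k : Nat) :
    (match PySem.List.max? (x0 :: t.take k) (fun y => y) with
      | some m => (((PySem.List.index? (x0 :: t.take k) m).getD 0 : Nat) : Int)
      | none => (0 : Int)) = ((pvMidx x0 t k : Nat) : Int) := by
  rw [PySem.List.max?_id_cons]
  rfl

-- members of the prefix are bounded by the running maximum
lemma pvMem_le (x0 : Int) (t : List Int) (k : Nat) :
    ∀ y ∈ x0 :: t.take k, y ≤ pvMval x0 t k := by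
  intro y hy
  rcases List.mem_cons.mp hy with h | h
  · subst h; exact (PySem.List.le_foldl_max (t.take k) y).1
  · exact (PySem.List.le_foldl_max (t.take k) x0).2 y h

-- the running maximum is a member of the prefix
lemma pvMval_mem (x0 : Int) (t : List Int) (k : Nat) :
    pvMval x0 t k ∈ x0 :: t.take k := by
  unfold pvMval
  rcases PySem.List.foldl_max_mem (t.take k) x0 with h | h
  · rw [h]; exact List.mem_cons_self
  · exact List.mem_cons_of_mem _ h

-- loop invariant for A's fold: after k steps the state is
-- (earliest argmax, running max, B's entries) of the length-(k+1) prefix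
lemma pvInv (x0 : Int) (t : List Int) (k : Nat) (hk : k ≤ t.length) :
    (PySem.List.pyRange 1 ((k : Int) + 1) 1).foldl
      (fun (st : Int × Int × List Int) (i : Int) =>
        match st with
        | (maxidx, maxval, res) =>
          let xi := PySem.List.pyGetD (x0 :: t) i 0
          if xi > maxval then (i, xi, res ++ [i])
          else (maxidx, maxval, res ++ [maxidx]))
      (0, x0, [(0 : Int)])
    = ((pvMidx x0 t k : Int), pvMval x0 t k,
       (List.range (k + 1)).map (fun j => (pvMidx x0 t j : Int))) := by
  induction k with
  | zero =>
    simp only [Nat.cast_zero, zero_add]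
    rw [PySem.List.pyRange_one]
    have h2 : pvMidx x0 t 0 = 0 := by
      unfold pvMidx pvMval
      simp
    simp [h2, pvMval]
  | succ k ih =>
    have hk' : k ≤ t.length := Nat.le_of_succ_le hk
    have hkl : k < t.length := hk
    have hcast : (((k + 1 : Nat) : Int) + 1) = ((k : Int) + 1 + 1) := by push_cast; ring
    rw [hcast, PySem.List.pyRange_one_succ_right (by omega : (1:Int) ≤ (k:Int)+1),
        List.foldl_append, ih hk']
    have hxi : PySem.List.pyGetD (x0 :: t) ((k : Int) + 1) 0 = t[k] := by
      have h1 : ((k : Int) + 1) = ((k + 1 : Nat) : Int) := by push_cast; ring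
      rw [h1, PySem.List.pyGetD_natCast]
      simp [List.getD, hkl]
    have htake : t.take (k + 1) = t.take k ++ [t[k]] := by
      rw [List.take_add_one]; simp [hkl]
    have hmval : pvMval x0 t (k + 1) = max (pvMval x0 t k) t[k] := by
      unfold pvMval
      rw [htake, List.foldl_append]
      rfl
    simp only [List.foldl_cons, List.foldl_nil, hxi]
    by_cases hgt : t[k] > pvMval x0 t k
    · rw [if_pos hgt]
      have hnotmem : t[k] ∉ x0 :: t.take k := fun hmem =>
        absurd (pvMem_le x0 t k _ hmem) (not_le.mpr hgt)
      have hmv : pvMval x0 t (k + 1) = t[k] := by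
        rw [hmval]; exact max_eq_right (le_of_lt hgt)
      have hmi : pvMidx x0 t (k + 1) = k + 1 := by
        unfold pvMidx
        rw [hmv, htake, ← List.cons_append,
            PySem.List.index?_append_singleton_self _ _ hnotmem]
        simp [Nat.min_eq_left hk']
      refine Prod.ext ?_ (Prod.ext ?_ ?_)
      · simp only [hmi]; push_cast; ring
      · simp [hmv]
      · simp only [List.range_succ (n := k + 1), List.map_append, List.map_cons,
          List.map_nil, hmi]
        push_cast; ring_nf
    · rw [if_neg hgt]
      have hmv : pvMval x0 t (k + 1) = pvMval x0 t k := by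
        rw [hmval]; exact max_eq_left (not_lt.mp hgt)
      have hmi : pvMidx x0 t (k + 1) = pvMidx x0 t k := by
        unfold pvMidx
        rw [hmv, htake, ← List.cons_append,
            PySem.List.index?_append_of_mem _ (pvMval_mem x0 t k)]
      refine Prod.ext ?_ (Prod.ext ?_ ?_)
      · simp [hmi]
      · simp [hmv]
      · simp only [List.range_succ (n := k + 1), List.map_append, List.map_cons,
          List.map_nil, hmi]

-- B, rewritten prefix-wise
lemma pvAlt_eq (x0 : Int) (t : List Int) :
    argcummax_alt (x0 :: t)
      = (List.range (t.length + 1)).map (fun j => (pvMidx x0 t j : Int)) := by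
  unfold argcummax_alt
  rw [PySem.List.pyRange_one]
  simp only [Int.sub_zero, Int.toNat_natCast, List.map_map, List.length_cons]
  apply List.map_congr_left
  intro j hj
  have hslice : PySem.List.slice (x0 :: t) none (some ((0 : Int) + (j : Int) + 1))
      = x0 :: t.take j := by
    have h1 : ((0 : Int) + (j : Int) + 1) = ((j + 1 : Nat) : Int) := by push_cast; ring
    rw [h1, PySem.List.slice_to_natCast]
    simp
  simp only [Function.comp, hslice]
  exact pvEntry_eq x0 t j

-- ===== VERDICT (by name: the statement is the Claim_ definition above) =====
theorem argcummax_spec : Claim_equal_argcummax := by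
  intro x _
  unfold Spec_argcummax
  cases x with
  | nil => rfl
  | cons x0 t =>
    unfold argcummax
    rw [if_neg (by simp)]
    have hget0 : PySem.List.pyGetD (x0 :: t) 0 0 = x0 := by
      rw [show (0 : Int) = ((0 : Nat) : Int) from rfl, PySem.List.pyGetD_natCast]
      rfl
    have hlen : (((x0 :: t).length : Nat) : Int) = ((t.length : Int) + 1) := by
      push_cast [List.length_cons]; ring
    rw [hget0, hlen, pvInv x0 t t.length le_rfl, pvAlt_eq]
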